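-- pv_equiv track=rewrite | github.com/Apstra/apstra-api-python | aos/utils.py | redacted
-- ===== SOURCE A (Python) =====
-- def redacted(d):
--     if d is None or d == "":
--         return d
--
--     h = d.copy()
--     for sensitive in ["password", "token", "AuthToken"]:
--         if sensitive in d:
--             h[sensitive] = "<REDACTED>"
--     return h
-- ===== SOURCE B (Python) =====
-- def redacted(d):
--     if d is None or d == "":
--         return d
--     out = []
--     for k, v in d.items():
--         rv = "<REDACTED>" if k == "password" or k == "token" or k == "AuthToken" else v
--         out.append((k, rv))
--     return dict(out)
-- ===== Notes on version B (the rewrite author's own statement) =====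
-- stated objective: alternative
-- what changed: B rebuilds the result in one accumulator loop over the dict's items, masking a pair whose key equals one of the three sensitive names, instead of copying the dict and looping over the fixed key list with membership tests and in-place assignments.
import Mathlib
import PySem

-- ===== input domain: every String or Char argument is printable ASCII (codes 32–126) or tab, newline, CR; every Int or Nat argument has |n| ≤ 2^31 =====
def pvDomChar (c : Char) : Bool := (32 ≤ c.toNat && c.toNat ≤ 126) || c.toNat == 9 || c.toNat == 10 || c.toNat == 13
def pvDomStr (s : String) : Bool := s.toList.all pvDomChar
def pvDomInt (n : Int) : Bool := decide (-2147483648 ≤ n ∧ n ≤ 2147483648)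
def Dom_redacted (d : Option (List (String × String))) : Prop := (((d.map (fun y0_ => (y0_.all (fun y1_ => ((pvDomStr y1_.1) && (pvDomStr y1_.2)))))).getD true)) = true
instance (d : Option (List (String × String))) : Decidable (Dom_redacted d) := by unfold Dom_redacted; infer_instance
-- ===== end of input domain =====

-- B rebuilds the result with one accumulator loop over the items, masking each pair
-- whose key equals one of the three sensitive names, instead of A's copy-then-fix-three-keys
-- loop (alternative decomposition, same cost).

-- ===== PORT A =====
-- h = d.copy(); for sensitive in [...]: if sensitive in d: h[sensitive] = "<REDACTED>"
def redacted (d : Option (List (String × String))) : Option (List (String × String)) :=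
  match d with
  | none => none               -- 'if d is None: return d' (d == "" is never true for a dict)
  | some l =>
    let dd : PySem.Dict String String := PySem.Dict.mk l
    let h := ["password", "token", "AuthToken"].foldl
      (fun h s => if dd.contains s then h.insert s "<REDACTED>" else h) dd
    some h.items

-- ===== PORT B =====
-- out = []; for k, v in d.items(): out.append((k, rv)); return dict(out)
def redacted_alt (d : Option (List (String × String))) : Option (List (String × String)) :=
  match d with
  | none => none
  | some l =>
    let out := l.foldl
      (fun out kv =>
        let rv := if kv.1 == "password" || kv.1 == "token" || kv.1 == "AuthToken"
                  then "<REDACTED>" else kv.2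
        out ++ [(kv.1, rv)]) []
    some out

-- ===== PRECONDITION & SPEC =====
def Spec_redacted (d : Option (List (String × String))) (out : Option (List (String × String))) : Prop := out = redacted_alt d
instance (d : Option (List (String × String))) (out : Option (List (String × String))) : Decidable (Spec_redacted d out) := by unfold Spec_redacted; infer_instance

-- ===== CLAIM (what is proved, stated in full; the proofs are below) =====
def Claim_equal_redacted : Prop := ∀ (d : Option (List (String × String))), Dom_redacted d → Spec_redacted d (redacted d)

-- ===== LEMMAS AND PROOFS =====

-- one iteration of A's loop, at the items level, keeping track of the key list
lemma redacted_step (dd h : PySem.Dict String String) (s v : String)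
    (hk : h.keys = dd.keys) :
    (if dd.contains s then h.insert s v else h).items
        = h.items.map (fun p => if p.1 == s then (s, v) else p)
    ∧ (if dd.contains s then h.insert s v else h).keys = dd.keys := by
  split_ifs with hc
  · have hch : h.contains s = true := by
      rw [PySem.Dict.contains_iff_mem_keys, hk]
      exact (PySem.Dict.contains_iff_mem_keys dd s).mp hc
    exact ⟨PySem.Dict.items_insert_of_contains h v hch,
      (PySem.Dict.keys_insert_of_contains h v hch).trans hk⟩
  · refine ⟨?_, hk⟩
    have hns : ∀ p ∈ h.items, p.1 ≠ s := by
      intro p hp hps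
      exact absurd ((PySem.Dict.contains_iff_mem_keys dd s).mpr
        (hk ▸ hps ▸ PySem.Dict.mem_keys_of_mem_items h hp)) (by simp [hc])
    symm
    refine (List.map_congr_left (fun p hp => ?_)).trans (List.map_id _)
    simp [hns p hp]

-- B's accumulator loop computed as a map over the pairs
lemma redactFold_eq_map (l acc : List (String × String)) :
    l.foldl (fun out kv =>
        out ++ [(kv.1, if kv.1 == "password" || kv.1 == "token" || kv.1 == "AuthToken"
                       then "<REDACTED>" else kv.2)]) acc
      = acc ++ l.map (fun p =>
          (p.1, if p.1 == "password" || p.1 == "token" || p.1 == "AuthToken"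
                then "<REDACTED>" else p.2)) := by
  induction l generalizing acc with
  | nil => simp
  | cons p rest ih => rw [List.foldl_cons, ih]; simp

-- ===== VERDICT (by name: the statement is the Claim_ definition above) =====

theorem redacted_spec : Claim_equal_redacted := by
  intro d _
  unfold Spec_redacted redacted redacted_alt
  cases d with
  | none => rfl
  | some l =>
    simp only [List.foldl_cons, List.foldl_nil]
    congr 1
    set dd : PySem.Dict String String := PySem.Dict.mk l with hdd
    obtain ⟨h1i, h1k⟩ := redacted_step dd dd "password" "<REDACTED>" rfl
    obtain ⟨h2i, h2k⟩ := redacted_step dd _ "token" "<REDACTED>" h1k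
    obtain ⟨h3i, h3k⟩ := redacted_step dd _ "AuthToken" "<REDACTED>" h2k
    rw [h3i, h2i, h1i, redactFold_eq_map, List.nil_append]
    have hil : dd.items = l := rfl
    rw [hil, List.map_map, List.map_map]
    apply List.map_congr_left
    intro p _
    clear hdd h1i h1k h2i h2k h3i h3k hil
    by_cases c1 : p.1 = "password" <;> by_cases c2 : p.1 = "token" <;>
      by_cases c3 : p.1 = "AuthToken" <;>
      simp [c1, c2, c3]
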